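-- pv_equiv track=rewrite | github.com/megidont/megi-freecell | main.py | checkLoss
-- ===== SOURCE A (Python) =====
-- VALUMASK =	0b00001111;
--
-- REDMASK  =	0b00010000;
--
-- def checkLoss(b: dict[str, str]) -> int:
-- 	#any free cells								1
-- 	#any free columns							2
-- 	#do the bottom cards of any column fit in the home cells		3
-- 	#do any of the cards in the free cells fit in the home cells		4
--
-- 	#do any of the cards in the free cells fit under a column		5
-- 	#do any of the bottom cards fit under any other bottom card		6
-- 	if "" in b.values():
-- 		return 0;
-- 	if chr(ord(b["S"][-1]) + 1) in [ b["1"][-1], b["2"][-1], b["3"][-1], b["4"][-1], b["5"][-1], b["6"][-1], b["7"][-1], b["8"][-1] ]: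
-- 		return 0;
-- 	if chr(ord(b["H"][-1]) + 1) in [ b["1"][-1], b["2"][-1], b["3"][-1], b["4"][-1], b["5"][-1], b["6"][-1], b["7"][-1], b["8"][-1] ]:
-- 		return 0;
-- 	if chr(ord(b["C"][-1]) + 1) in [ b["1"][-1], b["2"][-1], b["3"][-1], b["4"][-1], b["5"][-1], b["6"][-1], b["7"][-1], b["8"][-1] ]:
-- 		return 0;
-- 	if chr(ord(b["D"][-1]) + 1) in [ b["1"][-1], b["2"][-1], b["3"][-1], b["4"][-1], b["5"][-1], b["6"][-1], b["7"][-1], b["8"][-1] ]: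
-- 		return 0;
-- 	if chr(ord(b["Q"][-1]) + 1) in [ b["1"][-1], b["2"][-1], b["3"][-1], b["4"][-1], b["5"][-1], b["6"][-1], b["7"][-1], b["8"][-1] ]:
-- 		return 0;
-- 	if chr(ord(b["W"][-1]) + 1) in [ b["1"][-1], b["2"][-1], b["3"][-1], b["4"][-1], b["5"][-1], b["6"][-1], b["7"][-1], b["8"][-1] ]:
-- 		return 0;
-- 	if chr(ord(b["E"][-1]) + 1) in [ b["1"][-1], b["2"][-1], b["3"][-1], b["4"][-1], b["5"][-1], b["6"][-1], b["7"][-1], b["8"][-1] ]: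
-- 		return 0;
-- 	if chr(ord(b["R"][-1]) + 1) in [ b["1"][-1], b["2"][-1], b["3"][-1], b["4"][-1], b["5"][-1], b["6"][-1], b["7"][-1], b["8"][-1] ]:
-- 		return 0;
--
-- 	i = 1;
-- 	pack = [];
-- 	stack = [];
-- 	while i < 9:
-- 		pack.append(ord(b[str(i)][-1]));
-- 		i += 1;
-- 	for a in [ "Q", "W", "E", "R" ]:
-- 		stack.append(ord(b[a][-1]));
-- 	stackpack = pack + stack;
-- 	for card in stackpack:
-- 		for dard in pack:
-- 			if ((card & REDMASK) != (dard & REDMASK)) and ((dard & VALUMASK) - (card & VALUMASK)) == 1: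
-- 				return 0;
--
-- 	return 1;
-- ===== SOURCE B (Python) =====
-- VALUMASK = 0b00001111
--
-- REDMASK = 0b00010000
--
--
-- def checkLoss(b: dict[str, str]) -> int:
--     if "" in b.values():
--         return 0
--     # one pass over the eight column bottoms: a bitmask of their character codes
--     # (for the foundation/freecell successor probes) and two 16-bit nibble masks
--     # of the bottoms split by colour bit (for the stacking test).
--     codebits = 0
--     botsby = [0, 0]
--     for k in "12345678":
--         x = ord(b[k][-1])
--         codebits |= 1 << x
--         botsby[(x & REDMASK) >> 4] |= 1 << (x & VALUMASK)
--     # one pass over foundations and freecells: probe the successor code, and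
--     # fold the freecell cards into the movable-card nibble masks.
--     allby = [botsby[0], botsby[1]]
--     for k in "SHCDQWER":
--         x = ord(b[k][-1])
--         if (codebits >> (x + 1)) & 1:
--             return 0
--         if k in "QWER":
--             allby[(x & REDMASK) >> 4] |= 1 << (x & VALUMASK)
--     # a card of colour r stacks on a bottom of colour 1-r with nibble one higher:
--     # a single bitwise AND against the shifted bottom masks decides all pairs at once.
--     if (allby[0] & (botsby[1] >> 1)) or (allby[1] & (botsby[0] >> 1)):
--         return 0
--     return 1
-- ===== Notes on version B (the rewrite author's own statement) =====
-- stated objective: alternative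
-- what changed: B replaces A's repeated 8-element membership lists and nested 12x8 pairwise stacking scan by two accumulation passes that build integer bitmasks (a code bitmask of the column bottoms and per-colour 16-bit nibble masks), deciding the successor probes by single bit tests and all stacking pairs at once by one bitwise AND of a mask against a shifted mask.
import Mathlib
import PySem

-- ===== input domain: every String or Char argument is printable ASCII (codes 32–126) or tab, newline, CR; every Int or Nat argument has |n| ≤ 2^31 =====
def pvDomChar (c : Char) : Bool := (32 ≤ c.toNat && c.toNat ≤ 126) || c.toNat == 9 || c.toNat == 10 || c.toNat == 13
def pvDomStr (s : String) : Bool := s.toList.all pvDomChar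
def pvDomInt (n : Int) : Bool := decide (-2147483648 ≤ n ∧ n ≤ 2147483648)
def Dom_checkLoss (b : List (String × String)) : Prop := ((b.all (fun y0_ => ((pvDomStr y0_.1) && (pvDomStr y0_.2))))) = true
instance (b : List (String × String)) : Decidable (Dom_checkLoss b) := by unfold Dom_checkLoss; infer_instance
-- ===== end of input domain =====

-- B replaces A's membership lists and nested pairwise stacking scan by two bitmask-building
-- passes (a code bitmask of the column bottoms and per-colour nibble masks) probed by single
-- bit tests and one bitwise AND (objective: alternative; same asymptotic cost).

def VALUMASK : Int := 15

def REDMASK : Int := 16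

-- shared accessor: ord-able bottom card  b[k][-1]  (none = KeyError / IndexError)
def botCard? (d : PySem.Dict String String) (k : String) : Option Char :=
  (d.get? k).bind (fun s => PySem.Str.pyGet? s (-1))

-- ===== PORT A =====
def checkLossA? (b : List (String × String)) : Option Int :=
  let d := PySem.Dict.ofList b
  if "" ∈ d.values then some 0 else
  (["1", "2", "3", "4", "5", "6", "7", "8"].mapM (botCard? d)).bind fun cols =>
  (botCard? d "S").bind fun cS =>
  if Char.ofNat (cS.toNat + 1) ∈ cols then some 0 else
  (botCard? d "H").bind fun cH =>
  if Char.ofNat (cH.toNat + 1) ∈ cols then some 0 else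
  (botCard? d "C").bind fun cC =>
  if Char.ofNat (cC.toNat + 1) ∈ cols then some 0 else
  (botCard? d "D").bind fun cD =>
  if Char.ofNat (cD.toNat + 1) ∈ cols then some 0 else
  (botCard? d "Q").bind fun cQ =>
  if Char.ofNat (cQ.toNat + 1) ∈ cols then some 0 else
  (botCard? d "W").bind fun cW =>
  if Char.ofNat (cW.toNat + 1) ∈ cols then some 0 else
  (botCard? d "E").bind fun cE =>
  if Char.ofNat (cE.toNat + 1) ∈ cols then some 0 else
  (botCard? d "R").bind fun cR =>
  if Char.ofNat (cR.toNat + 1) ∈ cols then some 0 else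
  -- while i < 9: pack.append(ord(b[str(i)][-1]))
  (((PySem.List.pyRange 1 9 1).map PySem.Int.toStr).mapM (botCard? d)).bind fun packc =>
  let pack : List Int := packc.map (fun c => (c.toNat : Int))
  -- for a in ["Q","W","E","R"]: stack.append(ord(b[a][-1]))
  (["Q", "W", "E", "R"].mapM (botCard? d)).bind fun stackc =>
  let stack : List Int := stackc.map (fun c => (c.toNat : Int))
  let stackpack := pack ++ stack
  if stackpack.any (fun card => pack.any (fun dard =>
      decide (PySem.Int.band card REDMASK ≠ PySem.Int.band dard REDMASK) &&
      (PySem.Int.band dard VALUMASK - PySem.Int.band card VALUMASK == 1)))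
  then some 0 else some 1

def checkLoss (b : List (String × String)) : Int :=
  (checkLossA? b).getD 0

-- ===== PORT B =====
-- allby[i] |= v on the two-element mask list (i is (x & REDMASK) >> 4, so 0 or 1)
def orIdx (st : Nat × Nat) (i v : Nat) : Nat × Nat :=
  if i = 0 then (st.1 ||| v, st.2) else (st.1, st.2 ||| v)

-- first loop of B: for k in "12345678": x = ord(b[k][-1]); codebits |= 1 << x;
--                  botsby[(x & REDMASK) >> 4] |= 1 << (x & VALUMASK)
def colPass (d : PySem.Dict String String) : List String → Nat × (Nat × Nat) → Option (Nat × (Nat × Nat))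
  | [], st => some st
  | k :: ks, st =>
    (botCard? d k).bind fun c =>
    let x := c.toNat
    colPass d ks (st.1 ||| (1 <<< x), orIdx st.2 ((x &&& 16) >>> 4) (1 <<< (x &&& 15)))

-- second loop of B: successor-bit probe with early return 0; freecell cards fold into allby
def homePass (d : PySem.Dict String String) (cb : Nat) : List String → Nat × Nat → Option (Sum Unit (Nat × Nat))
  | [], acc => some (Sum.inr acc)
  | k :: ks, acc =>
    (botCard? d k).bind fun c =>
    let x := c.toNat
    if (cb >>> (x + 1)) &&& 1 ≠ 0 then some (Sum.inl ()) else
    homePass d cb ks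
      (if k ∈ (["Q", "W", "E", "R"] : List String) then
        orIdx acc ((x &&& 16) >>> 4) (1 <<< (x &&& 15))
      else acc)

def checkLossB? (b : List (String × String)) : Option Int :=
  let d := PySem.Dict.ofList b
  if "" ∈ d.values then some 0 else
  (colPass d ["1", "2", "3", "4", "5", "6", "7", "8"] (0, (0, 0))).bind fun st =>
  (homePass d st.1 ["S", "H", "C", "D", "Q", "W", "E", "R"] st.2).bind fun r =>
  match r with
  | Sum.inl _ => some 0
  | Sum.inr a =>
    if (a.1 &&& (st.2.2 >>> 1)) ≠ 0 ∨ (a.2 &&& (st.2.1 >>> 1)) ≠ 0 then some 0 else some 1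

def checkLoss_alt (b : List (String × String)) : Int :=
  (checkLossB? b).getD 0

-- ===== PRECONDITION & SPEC =====
-- Pre_ admits exactly the inputs on which the Python A returns: either some value is "" (the
-- early guard fires) or all sixteen board keys are present in the dict (else A raises KeyError).
def Pre_checkLoss (b : List (String × String)) : Prop :=
  "" ∈ (PySem.Dict.ofList b).values ∨
  (∀ k ∈ (["S", "H", "C", "D", "Q", "W", "E", "R",
           "1", "2", "3", "4", "5", "6", "7", "8"] : List String),
     (PySem.Dict.ofList b).contains k = true)

instance (b : List (String × String)) : Decidable (Pre_checkLoss b) := by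
  unfold Pre_checkLoss; infer_instance

def pvWitness_checkLoss : (List (String × String)) :=
  [("S", "0"), ("H", "0"), ("C", "0"), ("D", "0"),
   ("Q", "a"), ("W", "b"), ("E", "c"), ("R", "d"),
   ("1", "e"), ("2", "f"), ("3", "g"), ("4", "h"),
   ("5", "i"), ("6", "j"), ("7", "k"), ("8", "l")]

def Spec_checkLoss (b : List (String × String)) (out : Int) : Prop := out = checkLoss_alt b
instance (b : List (String × String)) (out : Int) : Decidable (Spec_checkLoss b out) := by
  unfold Spec_checkLoss; infer_instance

-- ===== CLAIM (what is proved, stated in full; the proofs are below) =====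
def Claim_equal_checkLoss : Prop :=
  ∀ (b : List (String × String)), Dom_checkLoss b → Pre_checkLoss b →
    Spec_checkLoss b (checkLoss b)

-- ===== LEMMAS AND PROOFS =====

lemma and16_cases (n : Nat) : n &&& 16 = 0 ∨ n &&& 16 = 16 := by
  have h : n &&& 16 = n &&& 2 ^ 4 := by norm_num
  rw [h, Nat.and_two_pow]
  rcases Nat.testBit n 4 <;> simp

lemma botCard?_some (d : PySem.Dict String String) (k : String)
    (hk : d.contains k = true) (hv : "" ∉ d.values) : ∃ c, botCard? d k = some c := by
  have hg : ∃ s, d.get? k = some s := by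
    rw [PySem.Dict.contains_eq_isSome_get?] at hk
    exact Option.isSome_iff_exists.mp hk
  obtain ⟨s, hs⟩ := hg
  have hmem : s ∈ d.values := by
    have := PySem.Dict.mem_items_of_get?_eq_some (d := d) hs
    simp only [PySem.Dict.values]
    exact List.mem_map.mpr ⟨(k, s), this, rfl⟩
  have hne : s ≠ "" := fun h => hv (h ▸ hmem)
  have hl : s.toList ≠ [] := by simpa [String.toList_eq_nil_iff] using hne
  refine ⟨s.toList.getLast hl, ?_⟩
  simp only [botCard?, hs, Option.bind_some]
  rw [PySem.Str.pyGet?, PySem.Chars.pyGet?, PySem.List.pyGet?_neg_one]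
  exact List.getLast?_eq_some_getLast hl

-- cards extracted from a Dom-respecting board have codes ≤ 126
lemma values_foldl_insert (pairs : List (String × String)) (d : PySem.Dict String String)
    (s : String) (h : s ∈ (pairs.foldl (fun d kv => d.insert kv.1 kv.2) d).values) :
    s ∈ d.values ∨ s ∈ pairs.map Prod.snd := by
  induction pairs generalizing d with
  | nil => exact Or.inl h
  | cons p ps ih =>
    rcases ih (d.insert p.1 p.2) h with h' | h'
    · rcases PySem.Dict.mem_values_insert (d := d) p.1 p.2 s h' with h'' | h''
      · exact Or.inr (by simp [h''])
      · exact Or.inl h''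
    · exact Or.inr (by simp [h'])

lemma dom_code_le (b : List (String × String)) (hdom : Dom_checkLoss b) (k : String)
    (c : Char) (h : botCard? (PySem.Dict.ofList b) k = some c) : c.toNat ≤ 126 := by
  simp only [botCard?, Option.bind_eq_some_iff] at h
  obtain ⟨s, hs, hc⟩ := h
  have hmem : c ∈ s.toList := by
    rw [PySem.Str.pyGet?, PySem.Chars.pyGet?, PySem.List.pyGet?_neg_one] at hc
    exact List.mem_of_mem_getLast? hc
  have hsv : s ∈ (PySem.Dict.ofList b).values := by
    have := PySem.Dict.mem_items_of_get?_eq_some (d := PySem.Dict.ofList b) hs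
    simp only [PySem.Dict.values]
    exact List.mem_map.mpr ⟨(k, s), this, rfl⟩
  have hsb : s ∈ b.map Prod.snd := by
    have := values_foldl_insert b PySem.Dict.empty s (by
      have : PySem.Dict.ofList b = b.foldl (fun d kv => d.insert kv.1 kv.2) PySem.Dict.empty := rfl
      rwa [this] at hsv)
    simpa [PySem.Dict.values, PySem.Dict.empty] using this
  obtain ⟨⟨k', s'⟩, hkb, hks⟩ := List.mem_map.mp hsb
  have hstr : pvDomStr s' = true := by
    have h' := List.all_eq_true.mp hdom _ hkb
    simp only [Bool.and_eq_true] at h'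
    exact h'.2
  have hch : pvDomChar c = true := by
    subst hks
    exact List.all_eq_true.mp hstr _ hmem
  simp only [pvDomChar, Bool.or_eq_true, Bool.and_eq_true, decide_eq_true_eq, beq_iff_eq] at hch
  omega

lemma nat_ne_zero_iff_testBit (n : Nat) : n ≠ 0 ↔ ∃ i, n.testBit i := by
  constructor
  · intro h
    by_contra hc
    simp only [not_exists, Bool.not_eq_true] at hc
    exact h (Nat.eq_of_testBit_eq (fun i => by simp [hc i]))
  · rintro ⟨i, hi⟩ h
    subst h
    simp at hi

lemma bit_probe_iff (m j : Nat) : ((m >>> j) &&& 1 ≠ 0) ↔ m.testBit j := by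
  simp [Nat.testBit, Nat.and_comm]

-- the per-colour nibble-mask step shared by both passes of B
def nibStep (acc : Nat × Nat) (c : Char) : Nat × Nat :=
  orIdx acc ((c.toNat &&& 16) >>> 4) (1 <<< (c.toNat &&& 15))

def maskStep (st : Nat × (Nat × Nat)) (c : Char) : Nat × (Nat × Nat) :=
  (st.1 ||| (1 <<< c.toNat), nibStep st.2 c)

lemma colPass_eq (d : PySem.Dict String String) (ks : List String) (cs : List Char)
    (h : ks.mapM (botCard? d) = some cs) (st : Nat × (Nat × Nat)) :
    colPass d ks st = some (cs.foldl maskStep st) := by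
  induction ks generalizing cs st with
  | nil =>
    simp only [List.mapM_nil, pure, Option.some.injEq] at h
    subst h
    simp [colPass]
  | cons k ks ih =>
    cases hk : botCard? d k with
    | none => simp [List.mapM_cons, hk] at h
    | some c =>
      rw [List.mapM_cons, hk] at h
      cases hks : ks.mapM (botCard? d) with
      | none => rw [hks] at h; simp at h
      | some cs' =>
        rw [hks] at h
        have h' : c :: cs' = cs := by simpa using h
        subst h'
        simp only [colPass, hk, Option.bind_some, List.foldl_cons]
        exact ih cs' hks _

-- testBit characterisation of the code bitmask built by colPass
lemma foldl_mask_fst (cs : List Char) (st : Nat × (Nat × Nat)) (i : Nat) :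
    ((cs.foldl maskStep st).1).testBit i ↔ st.1.testBit i ∨ i ∈ cs.map Char.toNat := by
  induction cs generalizing st with
  | nil => simp
  | cons c cs ih =>
    simp only [List.foldl_cons, List.map_cons, List.mem_cons]
    rw [ih]
    have h1 : (1 <<< c.toNat) = 2 ^ c.toNat := by rw [Nat.shiftLeft_eq]; ring
    simp only [maskStep, Nat.testBit_or, h1, Nat.testBit_two_pow, Bool.or_eq_true,
      decide_eq_true_eq]
    tauto

lemma foldl_mask_snd (cs : List Char) (st : Nat × (Nat × Nat)) :
    (cs.foldl maskStep st).2 = cs.foldl nibStep st.2 := by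
  induction cs generalizing st with
  | nil => rfl
  | cons c cs ih => simp only [List.foldl_cons, maskStep]; exact ih _

-- testBit characterisation of the per-colour nibble masks
lemma foldl_nib_fst (cs : List Char) (acc : Nat × Nat) (v : Nat) :
    ((cs.foldl nibStep acc).1).testBit v ↔
      acc.1.testBit v ∨ ∃ c ∈ cs, c.toNat &&& 16 = 0 ∧ c.toNat &&& 15 = v := by
  induction cs generalizing acc with
  | nil => simp
  | cons c cs ih =>
    simp only [List.foldl_cons, List.mem_cons]
    rw [ih]
    have h1 : (1 <<< (c.toNat &&& 15)) = 2 ^ (c.toNat &&& 15) := by rw [Nat.shiftLeft_eq]; ring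
    rcases and16_cases c.toNat with h16 | h16 <;>
      simp only [nibStep, orIdx, h16, Nat.zero_shiftRight, reduceIte, Nat.reduceShiftRight,
        one_ne_zero, Nat.testBit_or, h1, Nat.testBit_two_pow, Bool.or_eq_true,
        decide_eq_true_eq] <;>
      constructor
    · rintro (((h | h) | ⟨c', hc', hp⟩)) 
      · exact Or.inl h
      · exact Or.inr ⟨c, Or.inl rfl, h16, h⟩
      · exact Or.inr ⟨c', Or.inr hc', hp⟩
    · rintro (h | ⟨c', (rfl | hc'), hp⟩)
      · exact Or.inl (Or.inl h)
      · exact Or.inl (Or.inr hp.2)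
      · exact Or.inr ⟨c', hc', hp⟩
    · rintro (h | ⟨c', hc', hp⟩)
      · exact Or.inl h
      · exact Or.inr ⟨c', Or.inr hc', hp⟩
    · rintro (h | ⟨c', (rfl | hc'), hp⟩)
      · exact Or.inl h
      · omega
      · exact Or.inr ⟨c', hc', hp⟩

lemma foldl_nib_snd (cs : List Char) (acc : Nat × Nat) (v : Nat) :
    ((cs.foldl nibStep acc).2).testBit v ↔
      acc.2.testBit v ∨ ∃ c ∈ cs, c.toNat &&& 16 = 16 ∧ c.toNat &&& 15 = v := by
  induction cs generalizing acc with
  | nil => simp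
  | cons c cs ih =>
    simp only [List.foldl_cons, List.mem_cons]
    rw [ih]
    have h1 : (1 <<< (c.toNat &&& 15)) = 2 ^ (c.toNat &&& 15) := by rw [Nat.shiftLeft_eq]; ring
    rcases and16_cases c.toNat with h16 | h16 <;>
      simp only [nibStep, orIdx, h16, Nat.zero_shiftRight, reduceIte, Nat.reduceShiftRight,
        one_ne_zero, Nat.testBit_or, h1, Nat.testBit_two_pow, Bool.or_eq_true,
        decide_eq_true_eq] <;>
      constructor
    · rintro (h | ⟨c', hc', hp⟩)
      · exact Or.inl h
      · exact Or.inr ⟨c', Or.inr hc', hp⟩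
    · rintro (h | ⟨c', (rfl | hc'), hp⟩)
      · exact Or.inl h
      · omega
      · exact Or.inr ⟨c', hc', hp⟩
    · rintro ((h | h) | ⟨c', hc', hp⟩)
      · exact Or.inl h
      · exact Or.inr ⟨c, Or.inl rfl, h16, h⟩
      · exact Or.inr ⟨c', Or.inr hc', hp⟩
    · rintro (h | ⟨c', (rfl | hc'), hp⟩)
      · exact Or.inl (Or.inl h)
      · exact Or.inl (Or.inr hp.2)
      · exact Or.inr ⟨c', hc', hp⟩

-- B's successor bit probe equals A's chr(ord+1)-membership, on Dom-bounded codes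
lemma succ_probe_iff (cols : List Char) (cb : Nat)
    (hcb : ∀ i, cb.testBit i ↔ i ∈ cols.map Char.toNat)
    (h : Char) (hh : h.toNat ≤ 126) :
    ((cb >>> (h.toNat + 1)) &&& 1 ≠ 0) ↔ Char.ofNat (h.toNat + 1) ∈ cols := by
  rw [bit_probe_iff, hcb]
  have hv : (h.toNat + 1).isValidChar := Or.inl (by omega)
  have ht : (Char.ofNat (h.toNat + 1)).toNat = h.toNat + 1 := by
    rw [Char.toNat_ofNat, if_pos hv]
  constructor
  · intro hm
    obtain ⟨c, hc, hcn⟩ := List.mem_map.mp hm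
    have : c = Char.ofNat (h.toNat + 1) := by
      rw [← Char.ofNat_toNat c, hcn]
    rw [← this]; exact hc
  · intro hm
    exact List.mem_map.mpr ⟨_, hm, ht⟩

lemma bandI16 (n : Nat) : PySem.Int.band (n : Int) 16 = ((n &&& 16 : Nat) : Int) := by
  exact_mod_cast PySem.Int.band_natCast n 16

lemma bandI15 (n : Nat) : PySem.Int.band (n : Int) 15 = ((n &&& 15 : Nat) : Int) := by
  exact_mod_cast PySem.Int.band_natCast n 15

-- B's one bitwise AND decides exactly A's nested pairwise stacking scan
lemma stack_iff (cols frees : List Char) (B0 B1 A0 A1 : Nat)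
    (hB0 : ∀ v, B0.testBit v ↔ ∃ c ∈ cols, c.toNat &&& 16 = 0 ∧ c.toNat &&& 15 = v)
    (hB1 : ∀ v, B1.testBit v ↔ ∃ c ∈ cols, c.toNat &&& 16 = 16 ∧ c.toNat &&& 15 = v)
    (hA0 : ∀ v, A0.testBit v ↔ ∃ c ∈ cols ++ frees, c.toNat &&& 16 = 0 ∧ c.toNat &&& 15 = v)
    (hA1 : ∀ v, A1.testBit v ↔ ∃ c ∈ cols ++ frees, c.toNat &&& 16 = 16 ∧ c.toNat &&& 15 = v) :
    ((A0 &&& (B1 >>> 1)) ≠ 0 ∨ (A1 &&& (B0 >>> 1)) ≠ 0) ↔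
      ((cols.map (fun c => (c.toNat : Int)) ++ frees.map (fun c => (c.toNat : Int))).any
        (fun card => (cols.map (fun c => (c.toNat : Int))).any (fun dard =>
          decide (PySem.Int.band card REDMASK ≠ PySem.Int.band dard REDMASK) &&
          (PySem.Int.band dard VALUMASK - PySem.Int.band card VALUMASK == 1))) = true) := by
  have hshift : ∀ (m i : Nat), (m >>> 1).testBit i = m.testBit (1 + i) :=
    fun m i => Nat.testBit_shiftRight m
  rw [← List.map_append]
  simp only [nat_ne_zero_iff_testBit, Nat.testBit_and, Bool.and_eq_true, hshift,
    List.any_map, List.any_eq_true, Function.comp, REDMASK, VALUMASK, bandI16, bandI15,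
    Bool.and_eq_true, decide_eq_true_eq, beq_iff_eq]
  constructor
  · rintro (⟨i, hA, hB⟩ | ⟨i, hA, hB⟩)
    · obtain ⟨c, hc, hc16, hc15⟩ := (hA0 i).mp hA
      obtain ⟨d', hd, hd16, hd15⟩ := (hB1 (1 + i)).mp hB
      refine ⟨c, hc, d', hd, ?_, ?_⟩ <;> [skip; skip]
      · intro he
        rw [hc16, hd16] at he
        exact absurd he (by norm_num)
      · rw [hc15, hd15]; push_cast; omega
    · obtain ⟨c, hc, hc16, hc15⟩ := (hA1 i).mp hA
      obtain ⟨d', hd, hd16, hd15⟩ := (hB0 (1 + i)).mp hB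
      refine ⟨c, hc, d', hd, ?_, ?_⟩
      · intro he
        rw [hc16, hd16] at he
        exact absurd he (by norm_num)
      · rw [hc15, hd15]; push_cast; omega
  · rintro ⟨c, hc, d', hd, hne, hdiff⟩
    have hdiff' : d'.toNat &&& 15 = (c.toNat &&& 15) + 1 := by
      omega
    rcases and16_cases c.toNat with hc16 | hc16
    · have hd16 : d'.toNat &&& 16 = 16 := by
        rcases and16_cases d'.toNat with h | h
        · exact absurd (by rw [hc16, h]) hne
        · exact h
      refine Or.inl ⟨c.toNat &&& 15, (hA0 _).mpr ⟨c, hc, hc16, rfl⟩,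
        (hB1 _).mpr ⟨d', hd, hd16, by omega⟩⟩
    · have hd16 : d'.toNat &&& 16 = 0 := by
        rcases and16_cases d'.toNat with h | h
        · exact h
        · exact absurd (by rw [hc16, h]) hne
      refine Or.inr ⟨c.toNat &&& 15, (hA1 _).mpr ⟨c, hc, hc16, rfl⟩,
        (hB0 _).mpr ⟨d', hd, hd16, by omega⟩⟩

-- ===== VERDICT (by name: the statement is the Claim_ definition above) =====
theorem checkLoss_spec : Claim_equal_checkLoss := by
  intro b hdom hpre
  unfold Spec_checkLoss checkLoss checkLoss_alt checkLossA? checkLossB?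
  by_cases hin : "" ∈ (PySem.Dict.ofList b).values
  · simp only [hin, if_pos]
  · rcases hpre with h | hkeys
    · exact absurd h hin
    set d := PySem.Dict.ofList b with hd
    obtain ⟨cS, hS⟩ := botCard?_some d "S" (hkeys _ (by simp)) hin
    obtain ⟨cH, hH⟩ := botCard?_some d "H" (hkeys _ (by simp)) hin
    obtain ⟨cC, hC⟩ := botCard?_some d "C" (hkeys _ (by simp)) hin
    obtain ⟨cD, hD⟩ := botCard?_some d "D" (hkeys _ (by simp)) hin
    obtain ⟨cQ, hQ⟩ := botCard?_some d "Q" (hkeys _ (by simp)) hin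
    obtain ⟨cW, hW⟩ := botCard?_some d "W" (hkeys _ (by simp)) hin
    obtain ⟨cE, hE⟩ := botCard?_some d "E" (hkeys _ (by simp)) hin
    obtain ⟨cR, hR⟩ := botCard?_some d "R" (hkeys _ (by simp)) hin
    obtain ⟨c1, h1⟩ := botCard?_some d "1" (hkeys _ (by simp)) hin
    obtain ⟨c2, h2⟩ := botCard?_some d "2" (hkeys _ (by simp)) hin
    obtain ⟨c3, h3⟩ := botCard?_some d "3" (hkeys _ (by simp)) hin
    obtain ⟨c4, h4⟩ := botCard?_some d "4" (hkeys _ (by simp)) hin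
    obtain ⟨c5, h5⟩ := botCard?_some d "5" (hkeys _ (by simp)) hin
    obtain ⟨c6, h6⟩ := botCard?_some d "6" (hkeys _ (by simp)) hin
    obtain ⟨c7, h7⟩ := botCard?_some d "7" (hkeys _ (by simp)) hin
    obtain ⟨c8, h8⟩ := botCard?_some d "8" (hkeys _ (by simp)) hin
    have hpr : ((PySem.List.pyRange 1 9 1).map PySem.Int.toStr)
        = (["1", "2", "3", "4", "5", "6", "7", "8"] : List String) := by decide
    have hcolsL : (["1", "2", "3", "4", "5", "6", "7", "8"] : List String).mapM (botCard? d)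
        = some [c1, c2, c3, c4, c5, c6, c7, c8] := by
      simp [List.mapM_cons, List.mapM_nil, h1, h2, h3, h4, h5, h6, h7, h8]
    have hfrees : (["Q", "W", "E", "R"] : List String).mapM (botCard? d)
        = some [cQ, cW, cE, cR] := by
      simp [List.mapM_cons, List.mapM_nil, hQ, hW, hE, hR]
    set cols : List Char := [c1, c2, c3, c4, c5, c6, c7, c8] with hcolsdef
    set frees : List Char := [cQ, cW, cE, cR] with hfreesdef
    set stV := cols.foldl maskStep (0, (0, 0)) with hstV
    have hcp : colPass d ["1", "2", "3", "4", "5", "6", "7", "8"] (0, (0, 0)) = some stV :=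
      colPass_eq d _ _ hcolsL _
    have hcb : ∀ i, stV.1.testBit i ↔ i ∈ cols.map Char.toNat := fun i => by
      rw [hstV]
      simpa using foldl_mask_fst cols (0, (0, 0)) i
    have hbnd : ∀ (k : String) (c : Char), botCard? d k = some c → c.toNat ≤ 126 := by
      intro k c hkc
      exact dom_code_le b hdom k c (by rwa [← hd])
    have hsS := succ_probe_iff cols stV.1 hcb cS (hbnd _ _ hS)
    have hsH := succ_probe_iff cols stV.1 hcb cH (hbnd _ _ hH)
    have hsC := succ_probe_iff cols stV.1 hcb cC (hbnd _ _ hC)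
    have hsD := succ_probe_iff cols stV.1 hcb cD (hbnd _ _ hD)
    have hsQ := succ_probe_iff cols stV.1 hcb cQ (hbnd _ _ hQ)
    have hsW := succ_probe_iff cols stV.1 hcb cW (hbnd _ _ hW)
    have hsE := succ_probe_iff cols stV.1 hcb cE (hbnd _ _ hE)
    have hsR := succ_probe_iff cols stV.1 hcb cR (hbnd _ _ hR)
    rw [if_neg hin, if_neg hin, hpr, hcolsL, hcp]
    simp only [Option.bind_some, hS, hH, hC, hD, hQ, hW, hE, hR, hfrees]
    by_cases pS : Char.ofNat (cS.toNat + 1) ∈ cols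
    · rw [if_pos pS]
      simp only [homePass, hS, Option.bind_some]
      rw [if_pos (hsS.mpr pS)]
      rfl
    rw [if_neg pS]
    by_cases pH : Char.ofNat (cH.toNat + 1) ∈ cols
    · rw [if_pos pH]
      simp only [homePass, hS, hH, Option.bind_some]
      rw [if_neg (fun h => pS (hsS.mp h)), if_neg (by decide : ¬ ("S" : String) ∈ (["Q", "W", "E", "R"] : List String)),
        if_pos (hsH.mpr pH)]
      rfl
    rw [if_neg pH]
    by_cases pC : Char.ofNat (cC.toNat + 1) ∈ cols
    · rw [if_pos pC]
      simp only [homePass, hS, hH, hC, Option.bind_some]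
      rw [if_neg (fun h => pS (hsS.mp h)), if_neg (by decide : ¬ ("S" : String) ∈ (["Q", "W", "E", "R"] : List String)),
        if_neg (fun h => pH (hsH.mp h)), if_neg (by decide : ¬ ("H" : String) ∈ (["Q", "W", "E", "R"] : List String)),
        if_pos (hsC.mpr pC)]
      rfl
    rw [if_neg pC]
    by_cases pD : Char.ofNat (cD.toNat + 1) ∈ cols
    · rw [if_pos pD]
      simp only [homePass, hS, hH, hC, hD, Option.bind_some]
      rw [if_neg (fun h => pS (hsS.mp h)), if_neg (by decide : ¬ ("S" : String) ∈ (["Q", "W", "E", "R"] : List String)),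
        if_neg (fun h => pH (hsH.mp h)), if_neg (by decide : ¬ ("H" : String) ∈ (["Q", "W", "E", "R"] : List String)),
        if_neg (fun h => pC (hsC.mp h)), if_neg (by decide : ¬ ("C" : String) ∈ (["Q", "W", "E", "R"] : List String)),
        if_pos (hsD.mpr pD)]
      rfl
    rw [if_neg pD]
    by_cases pQ : Char.ofNat (cQ.toNat + 1) ∈ cols
    · rw [if_pos pQ]
      simp only [homePass, hS, hH, hC, hD, hQ, Option.bind_some]
      rw [if_neg (fun h => pS (hsS.mp h)), if_neg (by decide : ¬ ("S" : String) ∈ (["Q", "W", "E", "R"] : List String)),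
        if_neg (fun h => pH (hsH.mp h)), if_neg (by decide : ¬ ("H" : String) ∈ (["Q", "W", "E", "R"] : List String)),
        if_neg (fun h => pC (hsC.mp h)), if_neg (by decide : ¬ ("C" : String) ∈ (["Q", "W", "E", "R"] : List String)),
        if_neg (fun h => pD (hsD.mp h)), if_neg (by decide : ¬ ("D" : String) ∈ (["Q", "W", "E", "R"] : List String)),
        if_pos (hsQ.mpr pQ)]
      rfl
    rw [if_neg pQ]
    by_cases pW : Char.ofNat (cW.toNat + 1) ∈ cols
    · rw [if_pos pW]
      simp only [homePass, hS, hH, hC, hD, hQ, hW, Option.bind_some]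
      rw [if_neg (fun h => pS (hsS.mp h)), if_neg (by decide : ¬ ("S" : String) ∈ (["Q", "W", "E", "R"] : List String)),
        if_neg (fun h => pH (hsH.mp h)), if_neg (by decide : ¬ ("H" : String) ∈ (["Q", "W", "E", "R"] : List String)),
        if_neg (fun h => pC (hsC.mp h)), if_neg (by decide : ¬ ("C" : String) ∈ (["Q", "W", "E", "R"] : List String)),
        if_neg (fun h => pD (hsD.mp h)), if_neg (by decide : ¬ ("D" : String) ∈ (["Q", "W", "E", "R"] : List String)),
        if_neg (fun h => pQ (hsQ.mp h)), if_pos (by decide : ("Q" : String) ∈ (["Q", "W", "E", "R"] : List String)),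
        if_pos (hsW.mpr pW)]
      rfl
    rw [if_neg pW]
    by_cases pE : Char.ofNat (cE.toNat + 1) ∈ cols
    · rw [if_pos pE]
      simp only [homePass, hS, hH, hC, hD, hQ, hW, hE, Option.bind_some]
      rw [if_neg (fun h => pS (hsS.mp h)), if_neg (by decide : ¬ ("S" : String) ∈ (["Q", "W", "E", "R"] : List String)),
        if_neg (fun h => pH (hsH.mp h)), if_neg (by decide : ¬ ("H" : String) ∈ (["Q", "W", "E", "R"] : List String)),
        if_neg (fun h => pC (hsC.mp h)), if_neg (by decide : ¬ ("C" : String) ∈ (["Q", "W", "E", "R"] : List String)),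
        if_neg (fun h => pD (hsD.mp h)), if_neg (by decide : ¬ ("D" : String) ∈ (["Q", "W", "E", "R"] : List String)),
        if_neg (fun h => pQ (hsQ.mp h)), if_pos (by decide : ("Q" : String) ∈ (["Q", "W", "E", "R"] : List String)),
        if_neg (fun h => pW (hsW.mp h)), if_pos (by decide : ("W" : String) ∈ (["Q", "W", "E", "R"] : List String)),
        if_pos (hsE.mpr pE)]
      rfl
    rw [if_neg pE]
    by_cases pR : Char.ofNat (cR.toNat + 1) ∈ cols
    · rw [if_pos pR]
      simp only [homePass, hS, hH, hC, hD, hQ, hW, hE, hR, Option.bind_some]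
      rw [if_neg (fun h => pS (hsS.mp h)), if_neg (by decide : ¬ ("S" : String) ∈ (["Q", "W", "E", "R"] : List String)),
        if_neg (fun h => pH (hsH.mp h)), if_neg (by decide : ¬ ("H" : String) ∈ (["Q", "W", "E", "R"] : List String)),
        if_neg (fun h => pC (hsC.mp h)), if_neg (by decide : ¬ ("C" : String) ∈ (["Q", "W", "E", "R"] : List String)),
        if_neg (fun h => pD (hsD.mp h)), if_neg (by decide : ¬ ("D" : String) ∈ (["Q", "W", "E", "R"] : List String)),
        if_neg (fun h => pQ (hsQ.mp h)), if_pos (by decide : ("Q" : String) ∈ (["Q", "W", "E", "R"] : List String)),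
        if_neg (fun h => pW (hsW.mp h)), if_pos (by decide : ("W" : String) ∈ (["Q", "W", "E", "R"] : List String)),
        if_neg (fun h => pE (hsE.mp h)), if_pos (by decide : ("E" : String) ∈ (["Q", "W", "E", "R"] : List String)),
        if_pos (hsR.mpr pR)]
      rfl
    rw [if_neg pR]
    -- no early return: the home pass completes with the freecell cards folded in
    have hhp : homePass d stV.1 ["S", "H", "C", "D", "Q", "W", "E", "R"] stV.2
        = some (Sum.inr (frees.foldl nibStep stV.2)) := by
      simp only [homePass, hS, hH, hC, hD, hQ, hW, hE, hR, Option.bind_some]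
      rw [if_neg (fun h => pS (hsS.mp h)), if_neg (by decide : ¬ ("S" : String) ∈ (["Q", "W", "E", "R"] : List String)),
        if_neg (fun h => pH (hsH.mp h)), if_neg (by decide : ¬ ("H" : String) ∈ (["Q", "W", "E", "R"] : List String)),
        if_neg (fun h => pC (hsC.mp h)), if_neg (by decide : ¬ ("C" : String) ∈ (["Q", "W", "E", "R"] : List String)),
        if_neg (fun h => pD (hsD.mp h)), if_neg (by decide : ¬ ("D" : String) ∈ (["Q", "W", "E", "R"] : List String)),
        if_neg (fun h => pQ (hsQ.mp h)), if_pos (by decide : ("Q" : String) ∈ (["Q", "W", "E", "R"] : List String)),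
        if_neg (fun h => pW (hsW.mp h)), if_pos (by decide : ("W" : String) ∈ (["Q", "W", "E", "R"] : List String)),
        if_neg (fun h => pE (hsE.mp h)), if_pos (by decide : ("E" : String) ∈ (["Q", "W", "E", "R"] : List String)),
        if_neg (fun h => pR (hsR.mp h)), if_pos (by decide : ("R" : String) ∈ (["Q", "W", "E", "R"] : List String))]
      rfl
    rw [hhp]
    simp only [Option.bind_some]
    -- the final stacking test: one bitwise AND vs the nested pairwise scan
    have hB01 : stV.2 = cols.foldl nibStep (0, 0) := by
      rw [hstV]; exact foldl_mask_snd cols (0, (0, 0))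
    have hAcc : frees.foldl nibStep stV.2 = (cols ++ frees).foldl nibStep (0, 0) := by
      rw [hB01, List.foldl_append]
    have hB0 : ∀ v, (stV.2.1).testBit v ↔ ∃ c ∈ cols, c.toNat &&& 16 = 0 ∧ c.toNat &&& 15 = v := by
      intro v
      rw [hB01]
      simpa using foldl_nib_fst cols (0, 0) v
    have hB1 : ∀ v, (stV.2.2).testBit v ↔ ∃ c ∈ cols, c.toNat &&& 16 = 16 ∧ c.toNat &&& 15 = v := by
      intro v
      rw [hB01]
      simpa using foldl_nib_snd cols (0, 0) v
    have hA0 : ∀ v, ((frees.foldl nibStep stV.2).1).testBit v ↔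
        ∃ c ∈ cols ++ frees, c.toNat &&& 16 = 0 ∧ c.toNat &&& 15 = v := by
      intro v
      rw [hAcc]
      simpa using foldl_nib_fst (cols ++ frees) (0, 0) v
    have hA1 : ∀ v, ((frees.foldl nibStep stV.2).2).testBit v ↔
        ∃ c ∈ cols ++ frees, c.toNat &&& 16 = 16 ∧ c.toNat &&& 15 = v := by
      intro v
      rw [hAcc]
      simpa using foldl_nib_snd (cols ++ frees) (0, 0) v
    have hiff := stack_iff cols frees stV.2.1 stV.2.2
      (frees.foldl nibStep stV.2).1 (frees.foldl nibStep stV.2).2 hB0 hB1 hA0 hA1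
    by_cases hst : ((cols.map (fun c => (c.toNat : Int)) ++ frees.map (fun c => (c.toNat : Int))).any
        (fun card => (cols.map (fun c => (c.toNat : Int))).any (fun dard =>
          decide (PySem.Int.band card REDMASK ≠ PySem.Int.band dard REDMASK) &&
          (PySem.Int.band dard VALUMASK - PySem.Int.band card VALUMASK == 1)))) = true
    · rw [if_pos hst, if_pos (hiff.mpr hst)]
    · rw [if_neg hst, if_neg (fun h => hst (hiff.mp h))]
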